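-- pv_equiv track=rewrite | github.com/arnavcs/ASCII-Art | helperFunctions.py | lt_stringWidth
-- ===== SOURCE A (Python) =====
-- def lt_stringWidth (message: str) -> int:
--   """
--   Returns the number of characters wide that a string is
--   """
--   maxWidth = 0
--   runningWidth = 0
--
--   for character in message:
--     if (character == '\n'):
--       maxWidth = max(maxWidth, runningWidth)
--       runningWidth = 0
--     else:
--       runningWidth += 1
--
--   maxWidth = max(maxWidth, runningWidth)
--   return maxWidth
-- ===== SOURCE B (Python) =====
-- def lt_stringWidth(message: str) -> int:
--     """
--     Returns the number of characters wide that a string is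
--     """
--     return max(len(line) for line in message.split('\n'))
-- ===== Notes on version B (the rewrite author's own statement) =====
-- stated objective: simpler
-- what changed: Replaces the character-by-character running-width accumulator with a split on newlines followed by a max over per-line lengths (in CPython the split and len run in C, removing the per-character interpreted loop).
import Mathlib
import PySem

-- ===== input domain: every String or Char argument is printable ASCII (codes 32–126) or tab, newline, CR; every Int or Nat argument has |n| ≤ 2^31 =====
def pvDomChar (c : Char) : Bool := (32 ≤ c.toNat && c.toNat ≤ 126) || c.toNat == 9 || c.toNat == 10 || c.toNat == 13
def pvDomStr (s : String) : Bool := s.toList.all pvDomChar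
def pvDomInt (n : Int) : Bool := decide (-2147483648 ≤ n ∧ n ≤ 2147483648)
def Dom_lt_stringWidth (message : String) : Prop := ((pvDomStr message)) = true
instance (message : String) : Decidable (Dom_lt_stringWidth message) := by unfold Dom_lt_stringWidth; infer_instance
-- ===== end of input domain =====

-- B replaces A's per-character running-width accumulator with split('\n') + max of line lengths (simpler decomposition, same cost).

-- ===== PORT A =====
def lt_stringWidth (message : String) : Int :=
  let p := message.toList.foldl
    (fun (st : Int × Int) character =>
      if character = '\n' then (max st.1 st.2, 0) else (st.1, st.2 + 1))
    (0, 0)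
  max p.1 p.2

-- ===== PORT B =====
-- max(len(line) for line in message.split('\n')); split('\n') is never empty, so the
-- .getD 0 default of the max is unreachable (Python's max never raises here).
def lt_stringWidth_alt (message : String) : Int :=
  let lines := PySem.Chars.splitOn message.toList ['\n']
  (PySem.List.max? (lines.map (fun line => PySem.Chars.len line)) id).getD 0

-- ===== PRECONDITION & SPEC =====
def Spec_lt_stringWidth (message : String) (out : Int) : Prop := out = lt_stringWidth_alt message
instance (message : String) (out : Int) : Decidable (Spec_lt_stringWidth message out) := by unfold Spec_lt_stringWidth; infer_instance

-- ===== CLAIM (what is proved, stated in full; the proofs are below) =====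
def Claim_equal_lt_stringWidth : Prop := ∀ (message : String), Dom_lt_stringWidth message → Spec_lt_stringWidth message (lt_stringWidth message)

-- ===== LEMMAS AND PROOFS =====

/-- Reference split on '\n': structural recursion, always returns a nonempty list. -/
def splitNL : List Char → List (List Char)
  | [] => [[]]
  | c :: rest =>
    if c = '\n' then [] :: splitNL rest
    else match splitNL rest with
      | [] => [[c]]
      | x :: xs => (c :: x) :: xs

lemma splitNL_ne_nil (cs : List Char) : splitNL cs ≠ [] := by
  cases cs with
  | nil => simp [splitNL]
  | cons c rest =>
    simp only [splitNL]
    split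
    · simp
    · split <;> simp

lemma go_eq (fuel : Nat) (l cur : List Char) (acc : List (List Char))
    (h : l.length < fuel) :
    PySem.Chars.splitOn.go ['\n'] fuel l cur acc =
      acc.reverse ++ (match splitNL l with
        | [] => [cur.reverse]
        | x :: xs => (cur.reverse ++ x) :: xs) := by
  induction fuel generalizing l cur acc with
  | zero => omega
  | succ fuel ih =>
    cases l with
    | nil =>
      rw [PySem.Chars.splitOn.go]
      · simp [splitNL]
      · omega
    | cons c rest =>
      rw [PySem.Chars.splitOn.go]
      simp only [List.isPrefixOf, Bool.and_true, List.length_cons] at *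
      by_cases hc : c = '\n'
      · rw [if_pos (by simp [hc])]
        rw [ih _ _ _ (by simp; omega)]
        cases hs : splitNL rest with
        | nil => exact absurd hs (splitNL_ne_nil rest)
        | cons x xs => simp [splitNL, hc, hs]
      · rw [if_neg (by simp only [beq_iff_eq]; exact fun h' => hc h'.symm)]
        rw [ih _ _ _ (by omega)]
        simp only [splitNL, if_neg hc]
        cases hs : splitNL rest with
        | nil => exact absurd hs (splitNL_ne_nil rest)
        | cons x xs => simp

lemma splitOn_eq_splitNL (cs : List Char) :
    PySem.Chars.splitOn cs ['\n'] = splitNL cs := by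
  rw [PySem.Chars.splitOn, go_eq cs.length.succ cs [] [] (by omega)]
  cases hs : splitNL cs with
  | nil => exact absurd hs (splitNL_ne_nil cs)
  | cons x xs => simp

/-- head-adjusted widths: rW added to the first line's width. -/
def bump (rW : Int) : List Int → List Int
  | [] => []
  | w :: ws => (rW + w) :: ws

def widths (cs : List Char) : List Int := (splitNL cs).map (fun l => (l.length : Int))

lemma bump_zero (ws : List Int) : bump 0 ws = ws := by
  cases ws <;> simp [bump]

lemma fold_eq (cs : List Char) : ∀ (mW rW : Int),
    (let p := cs.foldl
        (fun (st : Int × Int) character =>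
          if character = '\n' then (max st.1 st.2, 0) else (st.1, st.2 + 1))
        (mW, rW);
      max p.1 p.2) = List.foldl max mW (bump rW (widths cs)) := by
  induction cs with
  | nil => intro mW rW; simp [widths, splitNL, bump]
  | cons c rest ih =>
    intro mW rW
    by_cases hc : c = '\n'
    · simp only [hc, List.foldl_cons, reduceIte]
      rw [ih (max mW rW) 0]
      simp only [widths, splitNL, reduceIte, List.map_cons, bump, List.foldl_cons]
      congr 1
      · simp
      · exact bump_zero _
    · simp only [List.foldl_cons, if_neg hc]
      rw [ih mW (rW + 1)]
      simp only [widths, splitNL, if_neg hc]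
      cases hs : splitNL rest with
      | nil => exact absurd hs (splitNL_ne_nil rest)
      | cons x xs => simp [bump]; ring_nf

lemma max?_getD (ws : List Int) : ∀ (w0 : Int),
    (PySem.List.max? (w0 :: ws) id).getD 0 = List.foldl max w0 ws := by
  induction ws with
  | nil => intro w0; simp [PySem.List.max?]
  | cons w ws ih =>
    intro w0
    have h1 : PySem.List.max? (w0 :: w :: ws) id = PySem.List.max? (max w0 w :: ws) id := by
      simp only [PySem.List.max?, List.foldl_cons, id]
      congr 1
      by_cases h : w0 < w
      · simp [if_pos h, max_eq_right (le_of_lt h)]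
      · simp [if_neg h, max_eq_left (le_of_not_gt h)]
    rw [h1, ih]
    simp

lemma widths_nonneg (cs : List Char) : ∀ w ∈ widths cs, 0 ≤ w := by
  intro w hw
  simp only [widths, List.mem_map] at hw
  obtain ⟨l, _, rfl⟩ := hw
  exact Int.natCast_nonneg _

-- ===== VERDICT (by name: the statement is the Claim_ definition above) =====
theorem lt_stringWidth_spec : Claim_equal_lt_stringWidth := by
  intro message _
  show lt_stringWidth message = lt_stringWidth_alt message
  unfold lt_stringWidth lt_stringWidth_alt
  dsimp only
  rw [splitOn_eq_splitNL]
  have hlen : (splitNL message.toList).map (fun line => PySem.Chars.len line) = widths message.toList := by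
    simp [widths, PySem.Chars.len]
  rw [hlen]
  cases hs : widths message.toList with
  | nil =>
    exact absurd (by simpa [widths] using congrArg List.isEmpty hs)
      (by simpa [List.isEmpty_iff] using splitNL_ne_nil message.toList)
  | cons w0 ws =>
    rw [max?_getD]
    have := fold_eq message.toList 0 0
    simp only [hs, bump, zero_add] at this
    rw [this]
    have h0 : max 0 w0 = w0 := by
      have : 0 ≤ w0 := widths_nonneg message.toList w0 (by rw [hs]; exact List.mem_cons_self ..)
      omega
    simp [h0]
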